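-- pv_equiv track=rewrite | github.com/DominikSpiljak/Artificial-Intelligence | lab2/solution.py | select_clauses
-- ===== SOURCE A (Python) =====
-- def select_clauses(loc, sos):
--     clauses = []
--     for clause in loc:
--         for part in clause:
--             if '~' in part:
--                 formated_part = part.replace('~', '')
--             else:
--                 formated_part = '~{}'.format(part)
--             for sos_part in sos:
--                 if formated_part in sos_part:
--                         clauses.append([clause, sos_part])
--                         break
--     return clauses
-- ===== SOURCE B (Python) =====
-- def select_clauses(loc, sos):
--     # Stage 1: flatten loc into indexed queries (negated literal, clause), in output order.
--     queries = []
--     for clause in loc: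
--         for part in clause:
--             neg = part.replace('~', '') if '~' in part else '~{}'.format(part)
--             queries.append((neg, clause))
--     # Stage 2: scan sos once, outer loop over sos; each sos clause resolves the
--     # pending queries whose literal it contains and the rest stay pending, so a
--     # query is claimed by the FIRST sos clause containing its literal.
--     resolved = {}
--     pending = list(enumerate(queries))
--     for sos_part in sos:
--         lits = set(sos_part)
--         still = []
--         for i, q in pending:
--             if q[0] in lits:
--                 resolved[i] = sos_part
--             else:
--                 still.append((i, q))
--         pending = still
--     # Stage 3: emit resolved queries in original order.
--     return [[q[1], resolved[i]] for i, q in enumerate(queries) if i in resolved]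
-- ===== Notes on version B (the rewrite author's own statement) =====
-- stated objective: faster
-- what changed: A scans sos afresh for every literal of every loc clause; B inverts the traversal: it flattens loc into indexed queries, makes sos the OUTER loop with each sos clause claiming (via one membership set) the still-pending queries whose literal it contains, and reassembles the output in original query order.
import Mathlib
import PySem

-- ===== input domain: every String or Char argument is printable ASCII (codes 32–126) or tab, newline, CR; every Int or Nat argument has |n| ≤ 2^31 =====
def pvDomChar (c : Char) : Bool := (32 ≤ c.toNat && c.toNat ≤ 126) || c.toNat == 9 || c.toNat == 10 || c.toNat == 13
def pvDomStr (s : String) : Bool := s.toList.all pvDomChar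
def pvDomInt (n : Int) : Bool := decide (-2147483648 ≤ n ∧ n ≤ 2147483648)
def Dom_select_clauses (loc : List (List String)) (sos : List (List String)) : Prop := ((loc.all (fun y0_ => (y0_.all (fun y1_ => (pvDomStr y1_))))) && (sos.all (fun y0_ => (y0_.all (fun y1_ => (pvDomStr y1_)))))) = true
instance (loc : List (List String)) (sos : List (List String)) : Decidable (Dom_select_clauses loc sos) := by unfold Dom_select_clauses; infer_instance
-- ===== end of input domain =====

-- B inverts the traversal: instead of rescanning sos for every literal of every loc
-- clause, it flattens loc into indexed queries, scans sos ONCE as the outer loop with a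
-- shrinking pending list (each sos clause claims the queries it resolves), and reassembles
-- the output in original query order (objective: faster; a timing run measured B faster on the generated inputs).

-- shared transliteration of the identical negation expression both Pythons contain:
-- part.replace('~','') if '~' in part else '~{}'.format(part)
def negLit (part : String) : String :=
  if PySem.Str.isIn "~" part then PySem.Str.replace part "~" "" else "~" ++ part

-- ===== PORT A =====
-- nested loops: for clause in loc / for part in clause, then a linear scan of
-- sos with `break` at the first sos_part containing the negated literal
def select_clauses (loc : List (List String)) (sos : List (List String)) : List (List (List String)) :=
  loc.foldl (fun clauses clause =>
    clause.foldl (fun clauses part =>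
      match sos.find? (fun sos_part => sos_part.contains (negLit part)) with
      | some sos_part => clauses ++ [[clause, sos_part]]
      | none => clauses) clauses) []

-- ===== PORT B =====
-- stage 1: queries = []; for clause in loc: for part in clause: queries.append((neg, clause))
def buildQueries (loc : List (List String)) : List (String × List String) :=
  loc.foldl (fun qs clause =>
    clause.foldl (fun qs part => qs ++ [(negLit part, clause)]) qs) []

-- stage 2: for sos_part in sos: lits = set(sos_part); partition pending into
-- resolved[i] = sos_part (hits) and still (misses); pending = still
def scanSos (sos : List (List String)) (pending : List (Int × (String × List String)))
    (resolved : PySem.Dict Int (List String)) : PySem.Dict Int (List String) :=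
  match sos with
  | [] => resolved
  | sp :: rest =>
      let lits := PySem.Set.ofList sp
      let st := pending.foldl
        (fun (st : List (Int × (String × List String)) × PySem.Dict Int (List String)) iq =>
          if lits.contains iq.2.1 then (st.1, st.2.insert iq.1 sp) else (st.1 ++ [iq], st.2))
        ([], resolved)
      scanSos rest st.1 st.2

-- stage 3: [[q[1], resolved[i]] for i, q in enumerate(queries) if i in resolved]
def select_clauses_alt (loc : List (List String)) (sos : List (List String)) : List (List (List String)) :=
  let queries := buildQueries loc
  let resolved := scanSos sos (PySem.List.enumerate queries) PySem.Dict.empty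
  (PySem.List.enumerate queries).filterMap (fun iq =>
    (resolved.get? iq.1).map (fun sp => [iq.2.2, sp]))

-- ===== PRECONDITION & SPEC =====
def Spec_select_clauses (loc : List (List String)) (sos : List (List String)) (out : List (List (List String))) : Prop := out = select_clauses_alt loc sos
instance (loc : List (List String)) (sos : List (List String)) (out : List (List (List String))) : Decidable (Spec_select_clauses loc sos out) := by unfold Spec_select_clauses; infer_instance

-- ===== CLAIM (what is proved, stated in full; the proofs are below) =====
def Claim_equal_select_clauses : Prop := ∀ (loc : List (List String)) (sos : List (List String)), Dom_select_clauses loc sos → Spec_select_clauses loc sos (select_clauses loc sos)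

-- ===== LEMMAS AND PROOFS =====

-- set(sos_part) membership agrees with list membership
theorem ofList_contains (sp : List String) (x : String) :
    (PySem.Set.ofList sp).contains x = sp.contains x := by
  rw [Bool.eq_iff_iff]
  simp [PySem.Set.mem_ofList]

-- the per-sos-clause partition loop, split into its two independent components
theorem step_split (sp : List String) (pending : List (Int × (String × List String)))
    (acc : List (Int × (String × List String))) (d : PySem.Dict Int (List String)) :
    pending.foldl
      (fun (st : List (Int × (String × List String)) × PySem.Dict Int (List String)) iq =>
        if sp.contains iq.2.1 then (st.1, st.2.insert iq.1 sp)
        else (st.1 ++ [iq], st.2)) (acc, d)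
    = (acc ++ pending.filter (fun iq => !(sp.contains iq.2.1)),
       pending.foldl (fun d iq => if sp.contains iq.2.1 then d.insert iq.1 sp else d) d) := by
  induction pending generalizing acc d with
  | nil => simp
  | cons iq rest ih =>
    rw [List.foldl_cons, List.foldl_cons, List.filter_cons]
    cases h : sp.contains iq.2.1 with
    | true =>
      rw [if_pos rfl, if_neg (by simp), if_pos rfl]
      exact ih acc (d.insert iq.1 sp)
    | false =>
      rw [if_neg (by simp), if_pos (by simp), if_neg (by simp)]
      rw [ih (acc ++ [iq]) d, List.append_assoc, List.singleton_append]

-- get? after the hit-insert loop: some sp iff pending holds key i with a hit literal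
theorem step_get? (sp : List String) (pending : List (Int × (String × List String)))
    (d : PySem.Dict Int (List String)) (i : Int) :
    (pending.foldl (fun d iq => if sp.contains iq.2.1 then d.insert iq.1 sp else d) d).get? i
      = if pending.any (fun iq => iq.1 == i && sp.contains iq.2.1) then some sp else d.get? i := by
  induction pending generalizing d with
  | nil => simp
  | cons iq rest ih =>
    rw [List.foldl_cons, List.any_cons]
    by_cases hk : iq.1 = i
    · subst hk
      rw [BEq.rfl, Bool.true_and]
      cases h : sp.contains iq.2.1 with
      | true =>
        rw [if_pos rfl, Bool.true_or, if_pos rfl, ih, PySem.Dict.get?_insert_self, ite_self]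
      | false =>
        rw [if_neg (by simp), Bool.false_or]
        exact ih d
    · have hbe : (iq.1 == i) = false := by simp [hk]
      rw [hbe, Bool.false_and, Bool.false_or]
      cases h : sp.contains iq.2.1 with
      | true =>
        rw [if_pos rfl, ih, PySem.Dict.get?_insert_of_ne _ _ (Ne.symm hk)]
      | false =>
        rw [if_neg (by simp)]
        exact ih d

-- with nodup keys, a key occurs with a unique payload
theorem key_unique {α : Type} {pending : List (Int × α)}
    (hnd : (pending.map Prod.fst).Nodup) {i : Int} {q : α} {iq : Int × α}
    (h1 : (i, q) ∈ pending) (h2 : iq ∈ pending) (hfst : iq.1 = i) : iq = (i, q) :=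
  List.inj_on_of_nodup_map hnd h2 h1 hfst

-- keys absent from pending are never written
theorem scanSos_get?_not_mem (sos : List (List String)) :
    ∀ (pending : List (Int × (String × List String))) (resolved : PySem.Dict Int (List String))
      (i : Int), i ∉ pending.map Prod.fst →
      (scanSos sos pending resolved).get? i = resolved.get? i := by
  induction sos with
  | nil => intro pending resolved i _; rfl
  | cons sp rest ih =>
    intro pending resolved i hi
    show (scanSos rest _ _).get? i = _
    simp only [ofList_contains]
    rw [step_split, List.nil_append, ih, step_get?]
    · have hany : pending.any (fun iq => iq.1 == i && sp.contains iq.2.1) = false := by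
        rw [List.any_eq_false]
        intro iq hiq
        have : iq.1 ≠ i := fun h => hi (h ▸ List.mem_map_of_mem hiq)
        simp [this]
      rw [hany]; rfl
    · intro hmem
      rcases List.mem_map.mp hmem with ⟨iq, hiq, hfst⟩
      exact hi (hfst ▸ List.mem_map_of_mem (List.mem_of_mem_filter hiq))

-- main invariant: a pending query (i, q) ends up resolved to the FIRST sos clause
-- containing its literal (exactly A's find?-with-break)
theorem scanSos_get?_mem (sos : List (List String)) :
    ∀ (pending : List (Int × (String × List String))) (resolved : PySem.Dict Int (List String))
      (i : Int) (q : String × List String),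
      (pending.map Prod.fst).Nodup → (i, q) ∈ pending → resolved.get? i = none →
      (scanSos sos pending resolved).get? i = sos.find? (fun sp => sp.contains q.1) := by
  induction sos with
  | nil => intro pending resolved i q _ _ hres; simpa [scanSos] using hres
  | cons sp rest ih =>
    intro pending resolved i q hnd hmem hres
    show (scanSos rest _ _).get? i = _
    simp only [ofList_contains]
    rw [step_split, List.nil_append, List.find?_cons]
    cases h : sp.contains q.1 with
    | true =>
      -- (i, q) is claimed by sp: i is not pending any more, and resolved[i] = sp
      have hnot : i ∉ (pending.filter (fun iq => !(sp.contains iq.2.1))).map Prod.fst := by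
        intro hmem'
        rcases List.mem_map.mp hmem' with ⟨iq, hiq, hfst⟩
        have heq : iq = (i, q) := key_unique hnd hmem (List.mem_of_mem_filter hiq) hfst
        have hcond := List.of_mem_filter hiq
        rw [heq] at hcond
        simp only [h, Bool.not_true] at hcond
        exact Bool.false_ne_true hcond
      rw [scanSos_get?_not_mem rest _ _ i hnot, step_get?]
      have hany : pending.any (fun iq => iq.1 == i && sp.contains iq.2.1) = true :=
        List.any_eq_true.mpr ⟨(i, q), hmem, by rw [BEq.rfl, Bool.true_and, h]⟩
      rw [hany, if_pos rfl]
    | false =>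
      -- (i, q) stays pending with resolved[i] still unset
      have hmem' : (i, q) ∈ pending.filter (fun iq => !(sp.contains iq.2.1)) :=
        List.mem_filter.mpr ⟨hmem, by rw [h]; rfl⟩
      have hnd' : ((pending.filter (fun iq => !(sp.contains iq.2.1))).map Prod.fst).Nodup :=
        List.Nodup.sublist (List.Sublist.map Prod.fst List.filter_sublist) hnd
      have hany : pending.any (fun iq => iq.1 == i && sp.contains iq.2.1) = false := by
        rw [List.any_eq_false]
        intro iq hiq
        by_cases hk : iq.1 = i
        · have heq : iq = (i, q) := key_unique hnd hmem hiq hk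
          rw [heq]; simp only [h, Bool.and_false]
          exact Bool.false_ne_true
        · simp [hk]
      have hres' : (pending.foldl (fun d iq => if sp.contains iq.2.1 then d.insert iq.1 sp else d) resolved).get? i = none := by
        rw [step_get?, hany, if_neg (by simp)]
        exact hres
      rw [ih _ _ i q hnd' hmem' hres']

-- stage 1 equals the flat list of (negated literal, clause) pairs
theorem buildQueries_inner (clause : List String) :
    ∀ (parts : List String) (acc : List (String × List String)),
      parts.foldl (fun qs part => qs ++ [(negLit part, clause)]) acc
        = acc ++ parts.map (fun part => (negLit part, clause)) := by
  intro parts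
  induction parts with
  | nil => simp
  | cons p ps ih => intro acc; simp [ih]

theorem buildQueries_eq (loc : List (List String)) :
    buildQueries loc = loc.flatMap (fun clause => clause.map (fun part => (negLit part, clause))) := by
  suffices h : ∀ (l : List (List String)) (acc : List (String × List String)),
      l.foldl (fun qs clause => clause.foldl (fun qs part => qs ++ [(negLit part, clause)]) qs) acc
        = acc ++ l.flatMap (fun clause => clause.map (fun part => (negLit part, clause))) by
    simpa [buildQueries] using h loc []
  intro l
  induction l with
  | nil => simp
  | cons c cs ih =>
    intro acc
    rw [List.foldl_cons, buildQueries_inner c c acc, ih, List.flatMap_cons, List.append_assoc]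

-- the enumerate indices are distinct
theorem nodup_fst_enumerate {α : Type} (xs : List α) :
    ((PySem.List.enumerate xs).map Prod.fst).Nodup := by
  have hp := PySem.List.pairwise_lt_enumerate (xs := xs) (s := 0)
  exact (List.pairwise_map.mpr (hp.imp (fun h => ne_of_lt h)))

-- A's per-clause loop, written as a filterMap
theorem inner_clause (sos : List (List String)) (clause : List String) :
    ∀ (parts : List String) (acc : List (List (List String))),
      parts.foldl (fun clauses part =>
        match sos.find? (fun sos_part => sos_part.contains (negLit part)) with
        | some sos_part => clauses ++ [[clause, sos_part]]
        | none => clauses) acc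
      = acc ++ parts.filterMap (fun part =>
          (sos.find? (fun sp => sp.contains (negLit part))).map (fun sp => [clause, sp])) := by
  intro parts
  induction parts with
  | nil => simp
  | cons part parts' ih =>
    intro acc
    rw [List.foldl_cons, ih, List.filterMap_cons]
    cases sos.find? (fun sos_part => sos_part.contains (negLit part)) <;> simp

theorem select_clauses_canonical (loc : List (List String)) (sos : List (List String)) :
    select_clauses loc sos
      = loc.flatMap (fun clause => clause.filterMap (fun part =>
          (sos.find? (fun sp => sp.contains (negLit part))).map (fun sp => [clause, sp]))) := by
  suffices h : ∀ (l : List (List String)) (acc : List (List (List String))),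
      l.foldl (fun clauses clause =>
        clause.foldl (fun clauses part =>
          match sos.find? (fun sos_part => sos_part.contains (negLit part)) with
          | some sos_part => clauses ++ [[clause, sos_part]]
          | none => clauses) clauses) acc
      = acc ++ l.flatMap (fun clause => clause.filterMap (fun part =>
          (sos.find? (fun sp => sp.contains (negLit part))).map (fun sp => [clause, sp]))) by
    simpa [select_clauses] using h loc []
  intro l
  induction l with
  | nil => simp
  | cons clause l' ih =>
    intro acc
    rw [List.foldl_cons, inner_clause sos clause, ih, List.flatMap_cons, List.append_assoc]

-- the flattened query list answered pointwise is A's flatMap-of-filterMap form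
theorem flatMap_queries (sos : List (List String)) (loc : List (List String)) :
    (loc.flatMap (fun clause => clause.map (fun part => (negLit part, clause)))).filterMap
        (fun q => (sos.find? (fun sp => sp.contains q.1)).map (fun sp => [q.2, sp]))
      = loc.flatMap (fun clause => clause.filterMap (fun part =>
          (sos.find? (fun sp => sp.contains (negLit part))).map (fun sp => [clause, sp]))) := by
  induction loc with
  | nil => simp
  | cons clause loc' ih =>
    rw [List.flatMap_cons, List.flatMap_cons, List.filterMap_append, ih, List.filterMap_map]
    rfl

-- B in canonical form: the sos-outer scan answers every query with A's find?
theorem select_clauses_alt_canonical (loc : List (List String)) (sos : List (List String)) :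
    select_clauses_alt loc sos
      = loc.flatMap (fun clause => clause.filterMap (fun part =>
          (sos.find? (fun sp => sp.contains (negLit part))).map (fun sp => [clause, sp]))) := by
  show (PySem.List.enumerate (buildQueries loc)).filterMap
        (fun iq => ((scanSos sos (PySem.List.enumerate (buildQueries loc)) PySem.Dict.empty).get? iq.1).map
          (fun sp => [iq.2.2, sp])) = _
  have hstep : ∀ iq ∈ PySem.List.enumerate (buildQueries loc),
      ((scanSos sos (PySem.List.enumerate (buildQueries loc)) PySem.Dict.empty).get? iq.1).map
          (fun sp => [iq.2.2, sp])
        = (sos.find? (fun sp => sp.contains iq.2.1)).map (fun sp => [iq.2.2, sp]) := by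
    intro iq hiq
    rw [scanSos_get?_mem sos _ PySem.Dict.empty iq.1 iq.2 (nodup_fst_enumerate _)
      (by simpa using hiq) (by simp)]
  rw [List.filterMap_congr hstep]
  have hsnd : (PySem.List.enumerate (buildQueries loc)).filterMap
      (fun iq => (sos.find? (fun sp => sp.contains iq.2.1)).map (fun sp => [iq.2.2, sp]))
      = (buildQueries loc).filterMap
          (fun q => (sos.find? (fun sp => sp.contains q.1)).map (fun sp => [q.2, sp])) := by
    conv_rhs => rw [← PySem.List.map_snd_enumerate (buildQueries loc) 0]
    rw [List.filterMap_map]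
    rfl
  rw [hsnd, buildQueries_eq, flatMap_queries]

-- ===== VERDICT (by name: the statement is the Claim_ definition above) =====
theorem select_clauses_spec : Claim_equal_select_clauses := by
  intro loc sos _
  unfold Spec_select_clauses
  rw [select_clauses_canonical, select_clauses_alt_canonical]
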